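-- pv_equiv track=rewrite | github.com/24127135/FreeCell-Project | gui/interface.py | _parse_results_report_entries
-- ===== SOURCE A (Python) =====
-- def _parse_results_report_entries(content):
--     lines = content.splitlines(keepends=True)
--     starts = [i for i, line in enumerate(lines) if line.startswith("[Test case ")]
--     entries = []
--     for idx, start in enumerate(starts):
--         end = starts[idx + 1] if idx + 1 < len(starts) else len(lines)
--         header = lines[start].strip()
--         body = "".join(lines[start:end]).rstrip("\n")
--         entries.append((header, body))
--     return entries
-- ===== SOURCE B (Python) =====
-- def _parse_results_report_entries(content):
--     entries = []
--     buffer = None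
--     for line in content.splitlines(keepends=True):
--         if line.startswith("[Test case "):
--             if buffer is not None:
--                 entries.append((buffer[0].strip(), "".join(buffer).rstrip("\n")))
--             buffer = [line]
--         elif buffer is not None:
--             buffer.append(line)
--     if buffer is not None:
--         entries.append((buffer[0].strip(), "".join(buffer).rstrip("\n")))
--     return entries
-- ===== Notes on version B (the rewrite author's own statement) =====
-- stated objective: alternative
-- what changed: Replaced the two-phase scheme (precompute the list of header-line indices, then slice out each [start,end) block with index lookups and joins) by a single streaming pass that maintains a current-entry buffer, flushing it whenever a new test-case header line is seen and once at the end.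
import Mathlib
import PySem

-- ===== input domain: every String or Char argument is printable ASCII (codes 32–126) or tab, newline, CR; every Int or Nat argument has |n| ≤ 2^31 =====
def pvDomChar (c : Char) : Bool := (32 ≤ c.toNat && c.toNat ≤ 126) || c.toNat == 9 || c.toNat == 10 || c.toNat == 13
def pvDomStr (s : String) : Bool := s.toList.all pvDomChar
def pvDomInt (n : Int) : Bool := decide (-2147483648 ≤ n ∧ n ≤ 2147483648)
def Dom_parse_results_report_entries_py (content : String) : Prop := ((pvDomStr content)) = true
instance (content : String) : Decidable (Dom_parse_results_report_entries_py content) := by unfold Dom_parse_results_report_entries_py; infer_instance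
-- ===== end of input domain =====

-- B replaces A's header-index precomputation + slicing by a single pass with a current-entry buffer (alternative decomposition, same cost).

-- shared primitives (both Pythons call the identical library functions):
-- content.splitlines(keepends=True), hand-ported; exact on the Dom alphabet (the only
-- line breaks there are '\n', '\r' and '\r\n')
def splitKeep : List Char → List (List Char)
  | [] => []
  | '\n' :: rest => ['\n'] :: splitKeep rest
  | '\r' :: '\n' :: rest => ['\r', '\n'] :: splitKeep rest
  | '\r' :: rest => ['\r'] :: splitKeep rest
  | c :: rest =>
    match splitKeep rest with
    | [] => [[c]]
    | l :: ls => (c :: l) :: ls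

-- s.rstrip("\n"), hand-ported (PySem has no rstrip-with-chars); exact: drops trailing '\n' only
def rstripNl (cs : List Char) : List Char := cs.rdropWhile (fun c => c == '\n')

def pvHdr : List Char := "[Test case ".toList

-- ===== PORT A =====
-- A-side helpers: the entry built from a start/end index pair, and the loop over enumerate(starts).
-- lines[start] is always in range when called (start comes from enumerate), so .getD [] is never used.
def entrySE (lines : List (List Char)) (s e : Int) : String × String :=
  (String.ofList (PySem.Chars.strip ((PySem.List.pyGet? lines s).getD [])),
   String.ofList (rstripNl (PySem.Chars.join [] (PySem.List.slice lines (some s) (some e)))))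

def aBuild (lines : List (List Char)) (starts : List Int) : List (String × String) :=
  (PySem.List.enumerate starts 0).map (fun p =>
    let e : Int := if p.1 + 1 < (starts.length : Int)
                   then (PySem.List.pyGet? starts (p.1 + 1)).getD 0
                   else (lines.length : Int)
    entrySE lines p.2 e)

def parse_results_report_entries_py (content : String) : List (String × String) :=
  let lines := splitKeep content.toList
  let starts := ((PySem.List.enumerate lines 0).filter
                   (fun p => PySem.Chars.startswith p.2 pvHdr)).map (·.1)
  aBuild lines starts

-- ===== PORT B =====
-- B-side helpers: the entry built from a buffered block of lines, and the single-pass loop.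
-- buffer[0]: the buffer is always nonempty when flushed (it starts with a header line), so .headD [] is never used.
def entryOf (b : List (List Char)) : String × String :=
  (String.ofList (PySem.Chars.strip (b.headD [])),
   String.ofList (rstripNl (PySem.Chars.join [] b)))

def bFlush : Option (List (List Char)) → List (String × String)
  | none => []
  | some b => [entryOf b]

def bLoop : List (List Char) → List (String × String) → Option (List (List Char)) → List (String × String)
  | [], acc, buf => acc ++ bFlush buf
  | l :: ls, acc, buf =>
    if PySem.Chars.startswith l pvHdr then bLoop ls (acc ++ bFlush buf) (some [l])
    else
      match buf with
      | none => bLoop ls acc none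
      | some b => bLoop ls acc (some (b ++ [l]))

def parse_results_report_entries_py_alt (content : String) : List (String × String) :=
  bLoop (splitKeep content.toList) [] none

-- ===== PRECONDITION & SPEC =====
def Spec_parse_results_report_entries_py (content : String) (out : List (String × String)) : Prop := out = parse_results_report_entries_py_alt content
instance (content : String) (out : List (String × String)) : Decidable (Spec_parse_results_report_entries_py content out) := by unfold Spec_parse_results_report_entries_py; infer_instance

-- ===== CLAIM (what is proved, stated in full; the proofs are below) =====
def Claim_equal_parse_results_report_entries_py : Prop := ∀ (content : String), Dom_parse_results_report_entries_py content → Spec_parse_results_report_entries_py content (parse_results_report_entries_py content)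

-- ===== LEMMAS AND PROOFS =====

-- the line predicate, abbreviated
def isHdr (l : List Char) : Bool := PySem.Chars.startswith l pvHdr

-- the common reference function: structural grouping of a line list into entries
def G : List (List Char) → List (String × String)
  | [] => []
  | l :: ls =>
    if isHdr l then entryOf (l :: ls.takeWhile (fun x => !isHdr x)) :: G ls
    else G ls

-- the header positions of a line list, as naturals, structurally
def startsN : List (List Char) → List Nat
  | [] => []
  | l :: ls =>
    if isHdr l then 0 :: (startsN ls).map (· + 1) else (startsN ls).map (· + 1)

-- ---------- B side ----------

theorem bLoop_acc (ls : List (List Char)) : ∀ (acc : List (String × String)) (buf : Option (List (List Char))),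
    bLoop ls acc buf = acc ++ bLoop ls [] buf := by
  induction ls with
  | nil => intro acc buf; simp [bLoop]
  | cons l ls ih =>
    intro acc buf
    by_cases h : PySem.Chars.startswith l pvHdr
    · simp only [bLoop, h, if_true]
      rw [ih, ih ([] ++ bFlush buf)]
      simp
    · cases buf with
      | none => simp only [bLoop, h, if_false]; exact ih acc none
      | some b =>
        simp only [bLoop, h, if_false]
        exact ih acc (some (b ++ [l]))

theorem bLoop_some (ls : List (List Char)) : ∀ (b : List (List Char)),
    bLoop ls [] (some b) = entryOf (b ++ ls.takeWhile (fun x => !isHdr x)) :: G ls := by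
  induction ls with
  | nil => intro b; simp [bLoop, bFlush, G]
  | cons l ls ih =>
    intro b
    by_cases h : isHdr l
    · have h' : PySem.Chars.startswith l pvHdr = true := h
      simp only [bLoop, h', if_true, bFlush]
      rw [bLoop_acc, ih [l]]
      simp [G, h', List.takeWhile_cons, isHdr]
    · have h' : PySem.Chars.startswith l pvHdr = false := by
        simpa [isHdr] using h
      simp only [bLoop, h', Bool.false_eq_true, if_false]
      rw [ih (b ++ [l])]
      simp [G, h', List.takeWhile_cons, isHdr]

theorem bLoop_none (ls : List (List Char)) : bLoop ls [] none = G ls := by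
  induction ls with
  | nil => simp [bLoop, bFlush, G]
  | cons l ls ih =>
    by_cases h : isHdr l
    · have h' : PySem.Chars.startswith l pvHdr = true := h
      simp only [bLoop, h', if_true, bFlush, List.append_nil]
      rw [bLoop_some]
      simp [G, h]
    · have h' : PySem.Chars.startswith l pvHdr = false := by simpa [isHdr] using h
      simp only [bLoop, h', Bool.false_eq_true, if_false]
      rw [ih]
      simp [G, h]

-- ---------- A side ----------

-- enumerate shift
theorem enumerate_shift (ls : List (List Char)) : ∀ (s : Int),
    PySem.List.enumerate ls (s + 1) = (PySem.List.enumerate ls s).map (fun p => (p.1 + 1, p.2)) := by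
  induction ls with
  | nil => intro s; simp [PySem.List.enumerate_nil]
  | cons l ls ih =>
    intro s
    rw [PySem.List.enumerate_cons, PySem.List.enumerate_cons, List.map_cons, ih (s + 1)]

theorem map_cast_succ (S : List Nat) :
    (S.map (fun (k : Nat) => (k : Int))).map (· + 1) = (S.map (· + 1)).map (fun (k : Nat) => (k : Int)) := by
  induction S with
  | nil => rfl
  | cons a S ih => simp only [List.map_cons, ih, Nat.cast_add, Nat.cast_one]

-- the port's starts list is startsN, cast to Int
theorem startsOf_eq (lines : List (List Char)) :
    ((PySem.List.enumerate lines 0).filter (fun p => PySem.Chars.startswith p.2 pvHdr)).map (·.1)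
      = (startsN lines).map (fun (k : Nat) => (k : Int)) := by
  induction lines with
  | nil => simp [PySem.List.enumerate_nil, startsN]
  | cons l ls ih =>
    rw [PySem.List.enumerate_cons, enumerate_shift ls 0, List.filter_cons]
    have key : (((PySem.List.enumerate ls 0).map (fun p => (p.1 + 1, p.2))).filter
          (fun p => PySem.Chars.startswith p.2 pvHdr)).map (·.1)
        = ((startsN ls).map (fun (k : Nat) => (k : Int))).map (· + 1) := by
      rw [List.filter_map, List.map_map, ← ih, List.map_map]
      rfl
    by_cases h : PySem.Chars.startswith l pvHdr
    · simp only [h, if_true, List.map_cons, startsN, isHdr, key]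
      rw [map_cast_succ]
      rfl
    · simp only [h, Bool.false_eq_true, if_false, startsN, isHdr, key]
      rw [map_cast_succ]

-- aBuild in consecutive-pairs form
theorem aBuild_pairs (lines : List (List Char)) (starts : List Int) :
    aBuild lines starts
      = (starts.zip (starts.tail ++ [(lines.length : Int)])).map (fun q => entrySE lines q.1 q.2) := by
  apply List.ext_getElem
  · simp only [aBuild, List.length_map, PySem.List.length_enumerate, List.length_zip,
      List.length_append, List.length_tail, List.length_singleton]
    omega
  · intro k h1 h2
    simp only [aBuild, List.getElem_map, PySem.List.getElem_enumerate, List.getElem_zip]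
    have hk : k < starts.length := by
      simpa only [aBuild, List.length_map, PySem.List.length_enumerate] using h1
    by_cases hlt : k + 1 < starts.length
    · have hc : (0 : Int) + (k : Int) + 1 < (starts.length : Int) := by push_cast; omega
      simp only [hc, if_true]
      have he : (0 : Int) + (k : Int) + 1 = ((k + 1 : Nat) : Int) := by push_cast; ring
      rw [he, PySem.List.pyGet?_natCast, List.getElem?_eq_getElem hlt, Option.getD_some]
      have hkt : k < starts.tail.length := by simp only [List.length_tail]; omega
      rw [List.getElem_append_left hkt, List.getElem_tail]
    · have hc : ¬ ((0 : Int) + (k : Int) + 1 < (starts.length : Int)) := by push_cast; omega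
      simp only [hc, if_false]
      have hkt : starts.tail.length ≤ k := by simp only [List.length_tail]; omega
      rw [List.getElem_append_right hkt]
      simp

-- entrySE at Nat indices, in drop/take form
theorem entrySE_cast (lines : List (List Char)) (s e : Nat) :
    entrySE lines (s : Int) (e : Int)
      = (String.ofList (PySem.Chars.strip (lines.getD s [])),
         String.ofList (rstripNl (PySem.Chars.join [] ((lines.drop s).take (e - s))))) := by
  simp [entrySE, PySem.List.pyGet?_natCast, PySem.List.slice_natCast, List.getD_eq_getElem?_getD]

theorem entrySE_shift (l : List Char) (ls : List (List Char)) (s e : Nat) :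
    entrySE (l :: ls) ((s : Int) + 1) ((e : Int) + 1) = entrySE ls (s : Int) (e : Int) := by
  have h1 : ((s : Int) + 1) = ((s + 1 : Nat) : Int) := by push_cast; ring
  have h2 : ((e : Int) + 1) = ((e + 1 : Nat) : Int) := by push_cast; ring
  rw [h1, h2, entrySE_cast, entrySE_cast]
  simp

-- startsN with no headers: all lines fail the predicate
theorem startsN_nil_iff (ls : List (List Char)) :
    startsN ls = [] → ∀ x ∈ ls, isHdr x = false := by
  induction ls with
  | nil => intro _ x hx; cases hx
  | cons l ls ih =>
    intro h x hx
    by_cases hl : isHdr l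
    · simp [startsN, hl] at h
    · simp only [startsN, hl, Bool.false_eq_true, if_false] at h
      rcases List.mem_cons.1 hx with hx | hx
      · simpa [hx] using hl
      · exact ih (by simpa using h) x hx

-- if startsN ls begins with s0, the first s0 lines are exactly the non-header prefix
theorem startsN_head_take (ls : List (List Char)) : ∀ (s0 : Nat) (rest : List Nat),
    startsN ls = s0 :: rest → ls.take s0 = ls.takeWhile (fun x => !isHdr x) := by
  induction ls with
  | nil => intro s0 rest h; simp [startsN] at h
  | cons l ls ih =>
    intro s0 rest h
    by_cases hl : isHdr l
    · simp only [startsN, hl, if_true] at h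
      injection h with h1 h2
      rw [← h1]
      simp [List.takeWhile_cons, hl]
    · simp only [startsN, hl, Bool.false_eq_true, if_false] at h
      cases hs : startsN ls with
      | nil => rw [hs] at h; simp at h
      | cons t ts =>
        rw [hs, List.map_cons] at h
        injection h with h1 h2
        rw [← h1]
        simp only [List.take_succ_cons, List.takeWhile_cons, hl]
        rw [ih t ts hs]
        simp

-- the zipped nat pairs, mapped through entrySE, give G
theorem mainA (lines : List (List Char)) :
    ((startsN lines).zip ((startsN lines).tail ++ [lines.length])).map
        (fun q => entrySE lines (q.1 : Int) (q.2 : Int)) = G lines := by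
  induction lines with
  | nil => simp [startsN, G]
  | cons l ls ih =>
    by_cases hl : isHdr l
    · simp only [startsN, hl, if_true, G]
      cases hs : startsN ls with
      | nil =>
        have htw : ls.takeWhile (fun x => !isHdr x) = ls := by
          rw [List.takeWhile_eq_self_iff.2]
          intro x hx; simp [startsN_nil_iff ls hs x hx]
        have hG : G ls = [] := by rw [← ih, hs]; simp
        simp only [hs, List.map_nil, List.tail_cons, List.nil_append, List.zip_cons_cons,
          List.zip_nil_left, List.map_cons, List.map_nil, hG, htw]
        rw [entrySE_cast]
        simp [entryOf, List.take_of_length_le]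
      | cons s0 rest =>
        simp only [hs, List.map_cons, List.tail_cons, List.cons_append, List.zip_cons_cons]
        congr 1
        · -- first entry
          rw [entrySE_cast]
          simp [entryOf, List.take_succ_cons, ← startsN_head_take ls s0 rest hs]
        · -- remaining entries reduce to ls
          have hzip : ((s0 + 1) :: rest.map (· + 1)).zip ((rest.map (· + 1)) ++ [(l :: ls).length])
              = ((s0 :: rest).zip (rest ++ [ls.length])).map (fun q => (q.1 + 1, q.2 + 1)) := by
            rw [show (l :: ls).length = ls.length + 1 by simp]
            rw [show (rest.map (· + 1)) ++ [ls.length + 1] = (rest ++ [ls.length]).map (· + 1) by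
              simp]
            rw [show ((s0 + 1) :: rest.map (· + 1)) = (s0 :: rest).map (· + 1) by simp]
            rw [List.zip_map]
            rfl
          rw [hzip, List.map_map, ← ih, hs, List.tail_cons]
          apply List.map_congr_left
          intro q _
          have := entrySE_shift l ls q.1 q.2
          simpa [Function.comp, Int.natCast_add] using this
    · simp only [startsN, hl, Bool.false_eq_true, if_false, G]
      cases hs : startsN ls with
      | nil => simp [hs, ← ih]
      | cons s0 rest =>
        simp only [hs, List.map_cons, List.tail_cons]
        have hzip : ((s0 + 1) :: rest.map (· + 1)).zip ((rest.map (· + 1)) ++ [(l :: ls).length])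
            = ((s0 :: rest).zip (rest ++ [ls.length])).map (fun q => (q.1 + 1, q.2 + 1)) := by
          rw [show (l :: ls).length = ls.length + 1 by simp]
          rw [show (rest.map (· + 1)) ++ [ls.length + 1] = (rest ++ [ls.length]).map (· + 1) by
            simp]
          rw [show ((s0 + 1) :: rest.map (· + 1)) = (s0 :: rest).map (· + 1) by simp]
          rw [List.zip_map]
          rfl
        rw [hzip, List.map_map, ← ih, hs, List.tail_cons]
        apply List.map_congr_left
        intro q _
        have := entrySE_shift l ls q.1 q.2
        simpa [Function.comp, Int.natCast_add] using this

-- A's port equals G on any line list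
theorem portA_eq_G (lines : List (List Char)) :
    aBuild lines (((PySem.List.enumerate lines 0).filter
        (fun p => PySem.Chars.startswith p.2 pvHdr)).map (·.1)) = G lines := by
  rw [startsOf_eq, aBuild_pairs]
  have hzip : ((startsN lines).map (fun (k : Nat) => (k : Int))).zip
        (((startsN lines).map (fun (k : Nat) => (k : Int))).tail ++ [(lines.length : Int)])
      = ((startsN lines).zip ((startsN lines).tail ++ [lines.length])).map
          (fun q => ((q.1 : Int), (q.2 : Int))) := by
    rw [show ((startsN lines).map (fun (k : Nat) => (k : Int))).tail ++ [(lines.length : Int)]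
          = ((startsN lines).tail ++ [lines.length]).map (fun (k : Nat) => (k : Int)) by
      rw [List.map_append, List.map_tail]; rfl]
    rw [List.zip_map]
    rfl
  rw [hzip, List.map_map, ← mainA lines]
  apply List.map_congr_left
  intro q _
  rfl

-- ===== VERDICT (by name: the statement is the Claim_ definition above) =====
theorem parse_results_report_entries_py_spec : Claim_equal_parse_results_report_entries_py := by
  intro content _
  unfold Spec_parse_results_report_entries_py
  unfold parse_results_report_entries_py parse_results_report_entries_py_alt
  rw [portA_eq_G, bLoop_none]
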